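-- pv_equiv track=rewrite | github.com/ToshikiShimizu/AtCoder | ABC/150/d.py | check_two
-- ===== SOURCE A (Python) =====
-- def check_two(A):
--     old = None
--     for n in A:
--         cnt = 0
--         while(n & 1 == 0):
--             cnt += 1
--             n = n >> 1
--         if old is None:
--             old = cnt
--         else:
--             if old!=cnt:
--                 return False
--     return True
-- ===== SOURCE B (Python) =====
-- def check_two(A):
--     # n & -n is the lowest set bit of n, i.e. 2**(number of trailing zeros):
--     # all trailing-zero counts are equal iff all lowest set bits are equal.
--     return len({n & -n for n in A}) <= 1
-- ===== Notes on version B (the rewrite author's own statement) =====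
-- stated objective: simpler
-- what changed: B drops the per-element shift-loop trailing-zero counter and the remembered-first-count comparison entirely: it maps each n to its lowest set bit via the two's-complement identity n & -n and tests that the set of these values has at most one element.
-- outside the precondition, e.g. on check_two([1, 2, 0]): A returns False, B returns False
import Mathlib
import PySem

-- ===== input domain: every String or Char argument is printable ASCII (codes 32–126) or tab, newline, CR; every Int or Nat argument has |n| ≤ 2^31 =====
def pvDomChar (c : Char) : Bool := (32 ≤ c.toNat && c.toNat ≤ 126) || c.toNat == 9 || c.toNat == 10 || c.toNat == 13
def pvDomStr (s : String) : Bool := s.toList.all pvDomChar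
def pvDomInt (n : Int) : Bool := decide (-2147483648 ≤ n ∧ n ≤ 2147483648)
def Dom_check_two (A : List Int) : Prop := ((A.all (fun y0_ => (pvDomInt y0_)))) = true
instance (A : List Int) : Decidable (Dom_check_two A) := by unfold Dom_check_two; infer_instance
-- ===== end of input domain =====

-- B replaces A's per-element shift-loop trailing-zero counter and first-count comparison by
-- mapping each n to its lowest set bit (n & -n) and testing that the set of those has ≤ 1 element.

-- ===== PORT A =====
-- Inner `while n & 1 == 0: cnt += 1; n = n >> 1`.  `n & 1` is PySem.Int.band n 1 and
-- `n >> 1` is floor division by 2 (PySem.Int.floordiv n 2) — both Python-exact on negatives.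
-- The while loop is totalised with fuel 40: under Dom (|n| ≤ 2^31) every n ≠ 0 leaves the
-- loop after at most 32 iterations, so the port is exact wherever the Python terminates
-- (for n = 0 the Python while loop never exits; those inputs are outside Pre_ below).
def pvCtzA : Nat → Int → Int → Int
  | 0, _, cnt => cnt
  | fuel + 1, n, cnt =>
    if PySem.Int.band n 1 == 0 then pvCtzA fuel (PySem.Int.floordiv n 2) (cnt + 1) else cnt

def pvLoopA : List Int → Option Int → Bool
  | [], _ => true
  | n :: rest, old =>
    let cnt := pvCtzA 40 n 0
    match old with
    | none => pvLoopA rest (some cnt)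
    | some o => if o != cnt then false else pvLoopA rest (some o)

def check_two (A : List Int) : Bool := pvLoopA A none

-- ===== PORT B =====
-- return len({n & -n for n in A}) <= 1
def check_two_alt (A : List Int) : Bool :=
  decide (PySem.Set.len (PySem.Set.ofList (A.map (fun n => PySem.Int.band n (-n)))) ≤ 1)

-- ===== PRECONDITION & SPEC =====
-- Pre_ excludes the lists containing 0: once A's inner `while n & 1 == 0` loop reaches a 0
-- it never exits (0 & 1 == 0 and 0 >> 1 == 0), so A diverges.  If an earlier mismatch makes A
-- return False before reaching the 0 (e.g. [1, 2, 0]), A and B both return False there; this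
-- simple closed-form condition is kept rather than pinpointing which 0s A actually reaches.
def Pre_check_two (A : List Int) : Prop := (0 : Int) ∉ A
instance (A : List Int) : Decidable (Pre_check_two A) := by unfold Pre_check_two; infer_instance

def pvWitness_check_two : List Int := [2, 6]

def Spec_check_two (A : List Int) (out : Bool) : Prop := out = check_two_alt A
instance (A : List Int) (out : Bool) : Decidable (Spec_check_two A out) := by unfold Spec_check_two; infer_instance

-- ===== CLAIM (what is proved, stated in full; the proofs are below) =====
def Claim_equal_check_two : Prop := ∀ (A : List Int), Dom_check_two A → Pre_check_two A → Spec_check_two A (check_two A)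

-- ===== LEMMAS AND PROOFS =====

-- Nat bit facts feeding the n & -n characterisation
theorem pvLand_two_mul (x y : Nat) : (2*x) &&& (2*y+1) = 2*(x &&& y) := by
  apply Nat.eq_of_testBit_eq; intro i
  cases i with
  | zero => simp
  | succ j =>
    simp only [Nat.testBit_land]
    simp only [Nat.testBit_succ]
    have h1 : 2*x/2 = x := by omega
    have h2 : (2*y+1)/2 = y := by omega
    have h3 : 2*(x&&&y)/2 = x&&&y := by omega
    rw [h1, h2, h3, Nat.testBit_land]

theorem pvLow_nat_odd (a : Nat) (h : a % 2 = 1) : a - (a &&& (a-1)) = 1 := by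
  obtain ⟨k, rfl⟩ : ∃ k, a = 2*k+1 := ⟨a/2, by omega⟩
  have : (2*k+1) &&& (2*k) = 2*k := by
    rw [Nat.land_comm, pvLand_two_mul]; simp [Nat.and_self]
  simp [this]

theorem pvLow_nat_double (a : Nat) (h : 0 < a) :
    2*a - (2*a &&& (2*a-1)) = 2*(a - (a &&& (a-1))) := by
  have h1 : 2*a-1 = 2*(a-1)+1 := by omega
  have h2 : 2*a &&& (2*a-1) = 2*(a &&& (a-1)) := by rw [h1, pvLand_two_mul]
  have h3 : a &&& (a-1) ≤ a := Nat.and_le_left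
  omega

-- n & -n written over natAbs
theorem pvBand_neg_self (n : Int) (h : n ≠ 0) :
    PySem.Int.band n (-n) = ((n.natAbs - (n.natAbs &&& (n.natAbs - 1)) : Nat) : Int) := by
  rcases lt_or_gt_of_ne h with hneg | hpos
  · have h1 : ¬ (0 ≤ n) := by omega
    have h2 : (0 : Int) ≤ -n := by omega
    simp only [PySem.Int.band, h1, h2, if_true, if_false]
    have e1 : (-n).toNat = n.natAbs := by omega
    have e2 : (-n - 1).toNat = n.natAbs - 1 := by omega
    rw [e1, e2]
  · have h1 : (0:Int) ≤ n := by omega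
    have h2 : ¬ ((0:Int) ≤ -n) := by omega
    simp only [PySem.Int.band, h1, h2, if_true, if_false]
    have e1 : n.toNat = n.natAbs := by omega
    have e2 : (-(-n) - 1).toNat = n.natAbs - 1 := by omega
    rw [e1, e2]

theorem pvCtzA_shift (fuel : Nat) : ∀ (n cnt : Int), pvCtzA fuel n cnt = cnt + pvCtzA fuel n 0 := by
  induction fuel with
  | zero => intro n cnt; simp [pvCtzA]
  | succ f ih =>
    intro n cnt
    simp only [pvCtzA]
    split
    · rw [ih _ (cnt+1), ih _ (0+1)]; ring
    · simp

-- the heart: A's shift loop computes k with n & -n = 2^k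
theorem pvCtz_band (fuel : Nat) : ∀ (n : Int), n ≠ 0 → n.natAbs < 2^fuel →
    ∃ k : Nat, pvCtzA fuel n 0 = (k : Int) ∧ PySem.Int.band n (-n) = 2^k := by
  induction fuel with
  | zero => intro n hn hb; simp at hb; omega
  | succ f ih =>
    intro n hn hb
    have hmod : PySem.Int.band n 1 = PySem.Int.mod n 2 := PySem.Int.band_one n
    by_cases he : PySem.Int.mod n 2 = 0
    · obtain ⟨m, rfl⟩ : ∃ m, n = 2*m := by
        obtain ⟨m, hm⟩ := (PySem.Int.mod_eq_zero_iff_dvd n 2).mp he; exact ⟨m, hm⟩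
      have hm0 : m ≠ 0 := by omega
      have hdiv : PySem.Int.floordiv (2*m) 2 = m := by
        rw [PySem.Int.floordiv_eq_ediv_of_pos (by omega)]; omega
      have hmb : m.natAbs < 2^f := by
        have : (2*m).natAbs = 2 * m.natAbs := by omega
        simp [Nat.pow_succ] at hb; omega
      obtain ⟨k, hk1, hk2⟩ := ih m hm0 hmb
      refine ⟨k+1, ?_, ?_⟩
      · simp only [pvCtzA, hmod, he]
        rw [if_pos (by simp), hdiv, pvCtzA_shift, hk1]
        push_cast; ring
      · have habs : (2*m).natAbs = 2 * m.natAbs := by omega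
        rw [pvBand_neg_self _ hn, habs, pvLow_nat_double _ (by omega)]
        rw [pvBand_neg_self _ hm0] at hk2
        push_cast
        rw [hk2]
        ring
    · have h01 : PySem.Int.mod n 2 = 1 := by
        have := PySem.Int.mod_nonneg n (b := 2) (by omega)
        have := PySem.Int.mod_lt n (b := 2) (by omega)
        omega
      have hodd : n.natAbs % 2 = 1 := by
        rw [PySem.Int.mod_eq_emod_of_pos (by omega)] at h01
        omega
      refine ⟨0, ?_, ?_⟩
      · simp only [pvCtzA, hmod, h01]
        rw [if_neg (by simp)]
        simp
      · rw [pvBand_neg_self _ hn, pvLow_nat_odd _ hodd]; simp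

-- equal trailing-zero counts ↔ equal lowest set bits (within the fuel bound)
theorem pvCtz_iff_band (a n : Int) (ha : a ≠ 0) (hn : n ≠ 0)
    (hba : a.natAbs < 2^40) (hbn : n.natAbs < 2^40) :
    (pvCtzA 40 n 0 = pvCtzA 40 a 0) ↔ (PySem.Int.band n (-n) = PySem.Int.band a (-a)) := by
  obtain ⟨k1, h11, h12⟩ := pvCtz_band 40 n hn hbn
  obtain ⟨k2, h21, h22⟩ := pvCtz_band 40 a ha hba
  rw [h11, h21, h12, h22]
  constructor
  · intro h
    have : k1 = k2 := by exact_mod_cast h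
    rw [this]
  · intro h
    have : (2:Int)^k1 = 2^k2 := h
    have : k1 = k2 := by
      have h2 : ((2:Nat):Int)^k1 = ((2:Nat):Int)^k2 := by exact_mod_cast this
      have : (2:Nat)^k1 = 2^k2 := by exact_mod_cast h2
      exact Nat.pow_right_injective (by omega) this
    rw [this]

-- A's loop, once the first count o is fixed, checks that every later count equals o
theorem pvLoopA_some (l : List Int) : ∀ (o : Int),
    pvLoopA l (some o) = l.all (fun n => pvCtzA 40 n 0 == o) := by
  induction l with
  | nil => intro o; rfl
  | cons n rest ih =>
    intro o
    simp only [pvLoopA, List.all_cons, ih]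
    by_cases h : o = pvCtzA 40 n 0
    · simp [h]
    · simp [bne_iff_ne, Ne.symm h, h]

theorem pvLen_foldl_add_le {α : Type} [BEq α] [LawfulBEq α] (l : List α) :
    ∀ (s : PySem.Set α), s.length ≤ (l.foldl PySem.Set.add s).length := by
  induction l with
  | nil => intro s; simp
  | cons x rest ih =>
    intro s
    simp only [List.foldl_cons]
    calc s.length ≤ (PySem.Set.add s x).length := by
          rw [PySem.Set.add_eq_ite]; split <;> simp
      _ ≤ _ := ih _

-- the set {…} built from c followed by l has ≤ 1 element iff every element of l is c
theorem pvLen_foldl_add_singleton {α : Type} [BEq α] [LawfulBEq α] (l : List α) :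
    ∀ (c : α), ((l.foldl PySem.Set.add [c]).length ≤ 1 ↔ ∀ x ∈ l, x = c) := by
  induction l with
  | nil => intro c; simp
  | cons x rest ih =>
    intro c
    simp only [List.foldl_cons]
    rw [PySem.Set.add_eq_ite]
    by_cases h : x ∈ ([c] : List α)
    · have hx : x = c := by simpa using h
      rw [if_pos h]
      simp [ih, hx]
    · rw [if_neg h]
      have h2 : (2:Nat) ≤ ((rest.foldl PySem.Set.add ([c] ++ [x]))).length := by
        have := pvLen_foldl_add_le rest ([c] ++ [x])
        simpa using this
      constructor
      · intro hle; omega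
      · intro hall
        exact absurd (hall x (by simp)) (by simpa using h)

-- ===== VERDICT (by name: the statement is the Claim_ definition above) =====
theorem check_two_spec : Claim_equal_check_two := by
  intro A hdom hpre
  unfold Spec_check_two check_two check_two_alt
  cases A with
  | nil => simp [pvLoopA, PySem.Set.ofList, PySem.Set.len]
  | cons a rest =>
    have hbound : ∀ n ∈ a :: rest, n.natAbs < 2^40 := by
      intro n hmem
      have := List.all_eq_true.mp hdom n hmem
      simp [pvDomInt] at this
      omega
    have hnz : ∀ n ∈ a :: rest, n ≠ 0 := by
      intro n hmem h0
      exact hpre (h0 ▸ hmem)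
    have ha0 : a ≠ 0 := hnz a (by simp)
    have hab : a.natAbs < 2^40 := hbound a (by simp)
    -- A side
    have hA : pvLoopA (a :: rest) none = rest.all (fun n => pvCtzA 40 n 0 == pvCtzA 40 a 0) := by
      simp only [pvLoopA]
      exact pvLoopA_some rest _
    -- B side
    have hB : PySem.Set.ofList ((a :: rest).map (fun n => PySem.Int.band n (-n)))
        = (rest.map (fun n => PySem.Int.band n (-n))).foldl PySem.Set.add
            [PySem.Int.band a (-a)] := by
      rw [PySem.Set.ofList_eq_foldl]
      simp [PySem.Set.add]
    rw [hA, hB]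
    have hlen : PySem.Set.len ((rest.map (fun n => PySem.Int.band n (-n))).foldl PySem.Set.add
        [PySem.Int.band a (-a)]) =
        (((rest.map (fun n => PySem.Int.band n (-n))).foldl PySem.Set.add
        [PySem.Int.band a (-a)]).length : Int) := rfl
    rw [Bool.eq_iff_iff]
    rw [List.all_eq_true]
    rw [decide_eq_true_iff, hlen]
    have : ((((rest.map (fun n => PySem.Int.band n (-n))).foldl PySem.Set.add
        [PySem.Int.band a (-a)]).length : Int) ≤ 1) ↔
        (((rest.map (fun n => PySem.Int.band n (-n))).foldl PySem.Set.add
        [PySem.Int.band a (-a)]).length ≤ 1) := by omega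
    rw [this, pvLen_foldl_add_singleton]
    simp only [List.mem_map, forall_exists_index, and_imp, forall_apply_eq_imp_iff₂]
    constructor
    · intro h n hmem
      have := h n hmem
      rw [beq_iff_eq] at this
      exact (pvCtz_iff_band a n ha0 (hnz n (by simp [hmem])) hab (hbound n (by simp [hmem]))).mp this
    · intro h n hmem
      rw [beq_iff_eq]
      exact (pvCtz_iff_band a n ha0 (hnz n (by simp [hmem])) hab (hbound n (by simp [hmem]))).mpr
        (h n hmem)
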